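-- pv_equiv track=rewrite | github.com/codeefy/100Days-of-Python | FavouriteSingerProblem.py | count_favourite_singers
-- ===== SOURCE A (Python) =====
-- def count_favourite_singers(playlist):  #function to count the favourite singers in the playlist
--     singer_count = {}  #initialise an empty dictionary
--     for singer in playlist: #for each singer in the playlist
--         if singer in singer_count:   #if the singer is in the singer count
--             singer_count[singer] += 1    #increment the count of the singer by 1
--         else:             # if the singer is not in the singer count
--             singer_count[singer] = 1  #add the singer to the singer count and set the count to 1
--
--     max_count = max(singer_count.values()) #get the maximum count of the singers
--     favourite_singers_count = sum(1 for count in singer_count.values() if count == max_count) # get the count of the favourite singers  and sum it  if the count is equal to the maximum count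
--
--     return favourite_singers_count  #return the count of the favourite singers
-- ===== SOURCE B (Python) =====
-- def count_favourite_singers(playlist):
--     # Sort the playlist so equal singers are adjacent, then make one pass
--     # tracking the current run length and a running (best, ties) pair.
--     best = 0
--     ties = 0
--     run = 0
--     prev = None
--     for singer in sorted(playlist):
--         run = run + 1 if singer == prev else 1
--         if run > best:
--             best = run
--             ties = 1
--         elif run == best:
--             ties += 1
--         prev = singer
--     return ties
-- ===== Notes on version B (the rewrite author's own statement) =====
-- stated objective: alternative
-- what changed: B uses no dictionary at all: it sorts the playlist so equal singers are adjacent and makes one pass over the runs, maintaining a running (best run length, number tied) pair, instead of A's hash histogram followed by a max-scan and a filtered sum.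
-- outside the precondition, e.g. on count_favourite_singers([]): A raises ValueError, B returns 0
import Mathlib
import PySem

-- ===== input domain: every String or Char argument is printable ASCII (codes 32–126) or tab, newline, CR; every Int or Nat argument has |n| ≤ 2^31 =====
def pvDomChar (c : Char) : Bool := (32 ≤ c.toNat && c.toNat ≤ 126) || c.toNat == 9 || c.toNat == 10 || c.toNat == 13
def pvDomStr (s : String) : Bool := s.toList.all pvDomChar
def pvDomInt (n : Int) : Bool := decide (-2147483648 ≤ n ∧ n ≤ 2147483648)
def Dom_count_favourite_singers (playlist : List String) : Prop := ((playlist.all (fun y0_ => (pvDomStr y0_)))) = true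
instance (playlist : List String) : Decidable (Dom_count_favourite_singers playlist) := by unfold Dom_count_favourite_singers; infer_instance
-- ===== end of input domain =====

-- B uses no dictionary: it sorts the playlist and scans the runs of equal singers
-- once, keeping a running (best run length, number tied) pair (alternative algorithm).

-- ===== PORT A =====
def count_favourite_singers (playlist : List String) : Int :=
  let singer_count := playlist.foldl
    (fun d singer =>
      if d.contains singer then d.insert singer (d.getD singer 0 + 1)
      else d.insert singer 1)
    (PySem.Dict.empty : PySem.Dict String Int)
  match PySem.List.max? singer_count.values (fun x => x) with
  | none => 0  -- unreachable under Pre_: Python's max([]) raises ValueError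
  | some max_count =>
      singer_count.values.foldl (fun acc count => acc + (if count == max_count then 1 else 0)) 0

-- ===== PORT B =====
-- the loop body of Source B: state = (best, ties, run, prev)
def runStep (st : Int × Int × Int × Option String) (singer : String) : Int × Int × Int × Option String :=
  let run' := if st.2.2.2 = some singer then st.2.2.1 + 1 else 1
  if run' > st.1 then (run', 1, run', some singer)
  else if run' = st.1 then (st.1, st.2.1 + 1, run', some singer)
  else (st.1, st.2.1, run', some singer)

def count_favourite_singers_alt (playlist : List String) : Int :=
  ((PySem.List.sorted playlist (fun x => x) false).foldl runStep (0, 0, 0, none)).2.1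

-- ===== PRECONDITION & SPEC =====
-- Pre_ excludes only the empty playlist, on which A raises ValueError from max([]).
def Pre_count_favourite_singers (playlist : List String) : Prop := playlist ≠ []
instance (playlist : List String) : Decidable (Pre_count_favourite_singers playlist) := by unfold Pre_count_favourite_singers; infer_instance
def pvWitness_count_favourite_singers : List String := (["a", "b", "a"])
def Spec_count_favourite_singers (playlist : List String) (out : Int) : Prop := out = count_favourite_singers_alt playlist
instance (playlist : List String) (out : Int) : Decidable (Spec_count_favourite_singers playlist out) := by unfold Spec_count_favourite_singers; infer_instance

-- ===== CLAIM (what is proved, stated in full; the proofs are below) =====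
def Claim_equal_count_favourite_singers : Prop := ∀ (playlist : List String), Dom_count_favourite_singers playlist → Pre_count_favourite_singers playlist → Spec_count_favourite_singers playlist (count_favourite_singers playlist)

-- ===== LEMMAS AND PROOFS =====

-- the multiset of per-singer counts of l, in first-occurrence order
def pvCounts (l : List String) : List Int :=
  (PySem.List.dedup l).map (fun y => (List.count y l : Int))

-- abstract form of Source B's loop body over a list of counts
def pvF (cs : List Int) (b t : Int) : Int :=
  if cs.foldl max b > b then (cs.count (cs.foldl max b) : Int) else t + (cs.count b : Int)

theorem pvF_perm {cs cs' : List Int} (h : cs.Perm cs') (b t : Int) :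
    pvF cs b t = pvF cs' b t := by
  unfold pvF
  rw [h.foldl_eq b, h.count_eq, h.count_eq]

theorem foldl_max_ge (b : Int) (cs : List Int) : b ≤ cs.foldl max b := by
  induction cs generalizing b with
  | nil => simp
  | cons c tl ih => exact le_trans (le_max_left b c) (ih _)

theorem pvF_cons (c : Int) (cs : List Int) (b t : Int) :
    pvF (c :: cs) b t =
      (if c > b then pvF cs c 1 else if c = b then pvF cs b (t + 1) else pvF cs b t) := by
  unfold pvF
  simp only [List.foldl_cons, List.count_cons]
  rcases lt_trichotomy b c with h | h | h
  · rw [if_pos h, max_eq_right h.le]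
    by_cases h2 : cs.foldl max c > c
    · have hne : (c == cs.foldl max c) = false := by simp [ne_of_lt h2]
      rw [if_pos (lt_trans h h2), if_pos h2, hne]
      simp
    · have he : cs.foldl max c = c := le_antisymm (not_lt.mp h2) (foldl_max_ge c cs)
      rw [he, if_pos h, if_neg (lt_irrefl c)]
      simp
      ring
  · subst h
    rw [if_neg (lt_irrefl b), if_pos rfl, max_self]
    by_cases h2 : cs.foldl max b > b
    · have hne : (b == cs.foldl max b) = false := by simp [ne_of_lt h2]
      rw [if_pos h2, if_pos h2, hne]
      simp
    · rw [if_neg h2, if_neg h2]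
      simp
      ring
  · rw [max_eq_left h.le, if_neg (not_lt.mpr h.le), if_neg (ne_of_lt h)]
    by_cases h2 : cs.foldl max b > b
    · have hne : (c == cs.foldl max b) = false := by simp [ne_of_lt (lt_trans h h2)]
      rw [if_pos h2, if_pos h2, hne]
      simp
    · have hne : (c == b) = false := by simp [ne_of_lt h]
      rw [if_neg h2, if_neg h2, hne]
      simp

-- removing the head singer: pvCounts l is a permutation of count x l :: pvCounts (filtered)
theorem pvCounts_cons_perm (x : String) (tl : List String) :
    (pvCounts (x :: tl)).Perm
      (((List.count x (x :: tl) : Int)) :: pvCounts ((x :: tl).filter (fun y => y != x))) := by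
  have hxr : x ∉ (x :: tl).filter (fun y => y != x) := by
    intro h
    have := List.of_mem_filter h
    simp at this
  have hperm : (PySem.List.dedup (x :: tl)).Perm (x :: PySem.List.dedup ((x :: tl).filter (fun y => y != x))) := by
    rw [List.perm_ext_iff_of_nodup (PySem.List.nodup_dedup _)
      (List.nodup_cons.mpr ⟨fun h => hxr ((PySem.List.mem_dedup _ x).mp h), PySem.List.nodup_dedup _⟩)]
    intro a
    simp only [PySem.List.mem_dedup, List.mem_cons]
    constructor
    · rintro (rfl | ha)
      · exact Or.inl rfl
      · by_cases hax : a = x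
        · exact Or.inl hax
        · exact Or.inr (List.mem_filter.mpr ⟨List.mem_cons.mpr (Or.inr ha), by simp [hax]⟩)
    · rintro (rfl | ha)
      · exact Or.inl rfl
      · exact List.mem_cons.mp (List.mem_of_mem_filter ha)
  have hmap := hperm.map (fun y => (List.count y (x :: tl) : Int))
  have hcongr : (x :: PySem.List.dedup ((x :: tl).filter (fun y => y != x))).map (fun y => (List.count y (x :: tl) : Int))
      = ((List.count x (x :: tl) : Int)) :: pvCounts ((x :: tl).filter (fun y => y != x)) := by
    simp only [List.map_cons, pvCounts]
    congr 1
    apply List.map_congr_left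
    intro a ha
    have ham := (PySem.List.mem_dedup _ a).mp ha
    have hax : a ≠ x := by rintro rfl; exact hxr ham
    have : List.count a ((x :: tl).filter (fun y => y != x)) = List.count a (x :: tl) := by
      rw [List.count_filter]
      simp [hax]
    rw [this]
  rw [hcongr] at hmap
  exact hmap

-- A's contains-branching counting loop is the plain counter loop.
theorem loopA_eq_counter (l : List String) :
    l.foldl
      (fun d singer =>
        if d.contains singer then d.insert singer (d.getD singer 0 + 1)
        else d.insert singer 1)
      (PySem.Dict.empty : PySem.Dict String Int)
    = PySem.Dict.counter l := by
  rw [← PySem.Dict.foldl_insert_getD_add_one_eq_counter]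
  congr 1
  funext d s
  by_cases h : d.contains s
  · simp [h]
  · have hc : d.contains s = false := by simpa using h
    simp [h, PySem.Dict.getD_of_not_contains d 0 hc]

-- the filtered-sum loop counts occurrences
theorem foldl_count_if (m : Int) (l : List Int) (a : Int) :
    l.foldl (fun acc c => acc + (if c == m then 1 else 0)) a = a + l.count m := by
  induction l generalizing a with
  | nil => simp
  | cons x t ih =>
      simp only [List.foldl, ih, List.count_cons]
      by_cases h : x = m
      · simp [h]; ring
      · simp only [beq_iff_eq, h, if_false]
        push_cast
        ring

theorem counter_values_eq_pvCounts (l : List String) :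
    (PySem.Dict.counter l).values = pvCounts l := by
  rw [PySem.Dict.values_eq_map_keys _ (PySem.Dict.nodup_keys_counter l) 0,
      PySem.Dict.keys_counter]
  unfold pvCounts PySem.List.dedup
  apply List.map_congr_left
  intro a _
  exact PySem.Dict.getD_counter l a

theorem pvCounts_pos (l : List String) : ∀ c ∈ pvCounts l, 0 < c := by
  intro c hc
  unfold pvCounts at hc
  obtain ⟨y, hy, rfl⟩ := List.mem_map.mp hc
  have : y ∈ l := (PySem.List.mem_dedup l y).mp hy
  have := List.count_pos_iff.mpr this
  exact_mod_cast this

theorem runStep_same (b t r : Int) (x : String) :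
    runStep (b, t, r, some x) x =
      (if r + 1 > b then (r + 1, 1, r + 1, some x)
       else if r + 1 = b then (b, t + 1, r + 1, some x)
       else (b, t, r + 1, some x)) := by
  simp [runStep]

-- within one run of x: the state advances arithmetically
theorem runStep_replicate (x : String) (j : Nat) : ∀ (b t r : Int), r ≤ b →
    (List.replicate j x).foldl runStep (b, t, r, some x) =
      (if r + j > b then (r + (j:Int), 1, r + (j:Int), some x)
       else if r + (j:Int) = b ∧ 0 < j then (b, t + 1, r + (j:Int), some x)
       else (b, t, r + (j:Int), some x)) := by
  induction j with
  | zero =>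
      intro b t r h
      simp only [List.replicate, List.foldl_nil, Nat.cast_zero, add_zero]
      rw [if_neg (by omega), if_neg (by omega)]
  | succ j ih =>
      intro b t r h
      rw [List.replicate_succ, List.foldl_cons, runStep_same]
      by_cases h1 : r + 1 > b
      · rw [if_pos h1, ih (r + 1) 1 (r + 1) le_rfl]
        split_ifs <;> simp only [Prod.mk.injEq, and_true, true_and] <;> omega
      · rw [if_neg h1]
        by_cases h2 : r + 1 = b
        · rw [if_pos h2, ih b (t + 1) (r + 1) (by omega)]
          split_ifs <;> simp only [Prod.mk.injEq, and_true, true_and] <;> omega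
        · rw [if_neg h2, ih b t (r + 1) (by omega)]
          split_ifs <;> simp only [Prod.mk.injEq, and_true, true_and] <;> omega

theorem runStep_fresh (b t r : Int) (prev : Option String) (x : String) (hprev : prev ≠ some x) :
    runStep (b, t, r, prev) x =
      (if 1 > b then ((1:Int), 1, (1:Int), some x)
       else if 1 = b then (b, t + 1, (1:Int), some x)
       else (b, t, (1:Int), some x)) := by
  simp [runStep, hprev]

-- a whole run of c copies of x, entered with prev ≠ some x
theorem runStep_run (x : String) (c : Nat) (hc : 0 < c) (b t r : Int) (prev : Option String)
    (hprev : prev ≠ some x) :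
    (List.replicate c x).foldl runStep (b, t, r, prev) =
      (if (c:Int) > b then ((c:Int), 1, (c:Int), some x)
       else if (c:Int) = b then (b, t + 1, (c:Int), some x)
       else (b, t, (c:Int), some x)) := by
  obtain ⟨j, rfl⟩ : ∃ j, c = j + 1 := ⟨c - 1, by omega⟩
  rw [List.replicate_succ, List.foldl_cons, runStep_fresh b t r prev x hprev]
  by_cases h1 : (1:Int) > b
  · rw [if_pos h1, runStep_replicate x j 1 1 1 le_rfl]
    split_ifs <;> simp only [Prod.mk.injEq, and_true, true_and] <;> omega
  · rw [if_neg h1]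
    by_cases h2 : (1:Int) = b
    · rw [if_pos h2, runStep_replicate x j b (t+1) 1 (by omega)]
      split_ifs <;> simp only [Prod.mk.injEq, and_true, true_and] <;> omega
    · rw [if_neg h2, runStep_replicate x j b t 1 (by omega)]
      split_ifs <;> simp only [Prod.mk.injEq, and_true, true_and] <;> omega

-- a sorted list starts with the full run of its head
theorem sorted_head_run : ∀ (l : List String), l.Pairwise (· ≤ ·) →
    ∀ h : String, (∀ y ∈ l, h ≤ y) →
    l = List.replicate (List.count h l) h ++ l.filter (fun y => y != h) := by
  intro l
  induction l with
  | nil => intro _ _ _; simp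
  | cons a tl ih =>
    intro hp h hall
    by_cases hah : a = h
    · subst hah
      have h1 : List.count a (a :: tl) = List.count a tl + 1 := by simp
      have h2 : (a :: tl).filter (fun y => y != a) = tl.filter (fun y => y != a) := by
        simp [List.filter]
      rw [h1, h2, List.replicate_succ, List.cons_append]
      have := ih (List.Pairwise.of_cons hp) a (fun y hy => List.rel_of_pairwise_cons hp hy)
      exact congrArg (a :: ·) this
    · have hlt : h < a := lt_of_le_of_ne (hall a List.mem_cons_self) (Ne.symm hah)
      have hnot : ∀ y ∈ a :: tl, y ≠ h := by
        intro y hy hh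
        subst hh
        rcases List.mem_cons.mp hy with rfl | hmem
        · exact hah rfl
        · exact absurd (List.rel_of_pairwise_cons hp hmem) (not_le.mpr hlt)
      have hcount : List.count h (a :: tl) = 0 := by
        rw [List.count_eq_zero]
        intro hmem
        exact hnot h hmem rfl
      have hfilt : (a :: tl).filter (fun y => y != h) = a :: tl := by
        apply List.filter_eq_self.mpr
        intro y hy
        simpa using hnot y hy
      rw [hcount, hfilt]
      simp

theorem fold_sorted (l : List String) : l.Pairwise (· ≤ ·) →
    ∀ (b t r : Int) (prev : Option String), (∀ h tl, l = h :: tl → prev ≠ some h) →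
    (l.foldl runStep (b, t, r, prev)).2.1 = pvF (pvCounts l) b t := by
  generalize hn : l.length = n
  induction n using Nat.strong_induction_on generalizing l with
  | _ n ih =>
    intro hp b t r prev hprev
    cases l with
    | nil =>
        simp [pvCounts, PySem.List.dedup, PySem.Set.ofList, pvF]
    | cons h tl =>
        subst hn
        have hall : ∀ y ∈ h :: tl, h ≤ y := by
          rintro y hy
          rcases List.mem_cons.mp hy with rfl | hmem
          · exact le_rfl
          · exact List.rel_of_pairwise_cons hp hmem
        have hdec := sorted_head_run (h :: tl) hp h hall
        set r2 := (h :: tl).filter (fun y => y != h) with hr2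
        have hc : 0 < List.count h (h :: tl) := by simp
        have hnotmem : h ∉ r2 := by
          intro hmem
          have := List.of_mem_filter hmem
          simp at this
        have hr2p : r2.Pairwise (· ≤ ·) := hp.sublist List.filter_sublist
        have hr2len : r2.length < (h :: tl).length := by
          rw [hr2]
          simp only [List.filter, bne_self_eq_false, List.length_cons]
          exact Nat.lt_succ_of_le (List.length_filter_le _ _)
        have hr2prev : ∀ h' tl', r2 = h' :: tl' → (some h : Option String) ≠ some h' := by
          intro h' tl' he hcontra
          apply hnotmem
          rw [he]
          have : h = h' := by injection hcontra
          rw [this]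
          exact List.mem_cons_self
        have hfoldeq : ((h :: tl).foldl runStep (b, t, r, prev)).2.1
            = ((List.replicate (List.count h (h :: tl)) h ++ r2).foldl runStep (b, t, r, prev)).2.1 := by
          rw [← hdec]
        rw [hfoldeq, List.foldl_append,
            runStep_run h (List.count h (h :: tl)) hc b t r prev (hprev h tl rfl)]
        rw [pvF_perm (pvCounts_cons_perm h tl) b t, pvF_cons]
        split_ifs with q1 q2
    -- three branches: apply IH to r2 with the matching state
        · rw [ih r2.length hr2len r2 rfl hr2p _ _ _ _ hr2prev]
        · rw [ih r2.length hr2len r2 rfl hr2p _ _ _ _ hr2prev]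
        · rw [ih r2.length hr2len r2 rfl hr2p _ _ _ _ hr2prev]

theorem pvCounts_perm {l l' : List String} (hperm : l.Perm l') :
    (pvCounts l).Perm (pvCounts l') := by
  have hd : (PySem.List.dedup l).Perm (PySem.List.dedup l') := by
    rw [List.perm_ext_iff_of_nodup (PySem.List.nodup_dedup l) (PySem.List.nodup_dedup l')]
    intro a
    rw [PySem.List.mem_dedup, PySem.List.mem_dedup]
    exact hperm.mem_iff
  have hmap := hd.map (fun y => (List.count y l : Int))
  have : (PySem.List.dedup l').map (fun y => (List.count y l : Int)) = pvCounts l' := by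
    unfold pvCounts
    apply List.map_congr_left
    intro a _
    rw [hperm.count_eq]
  rw [this] at hmap
  exact hmap

theorem alt_eq_pvF (l : List String) :
    count_favourite_singers_alt l = pvF (pvCounts l) 0 0 := by
  unfold count_favourite_singers_alt
  have hp : (PySem.List.sorted l (fun x => x) false).Pairwise (· ≤ ·) := by
    have := PySem.List.sorted_pairwise l (fun x => x)
    simpa using this
  rw [fold_sorted _ hp 0 0 0 none (by intro h tl _ hc; simp at hc)]
  exact pvF_perm (pvCounts_perm (PySem.List.sorted_perm l (fun x => x) false)) 0 0


-- ===== VERDICT (by name: the statement is the Claim_ definition above) =====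
theorem count_favourite_singers_spec : Claim_equal_count_favourite_singers := by
  intro playlist _ hpre
  unfold Spec_count_favourite_singers count_favourite_singers
  rw [alt_eq_pvF, loopA_eq_counter]
  simp only [counter_values_eq_pvCounts]
  cases hcs : pvCounts playlist with
  | nil =>
      exfalso
      cases playlist with
      | nil => exact hpre rfl
      | cons x tl =>
          have hx : x ∈ PySem.List.dedup (x :: tl) :=
            (PySem.List.mem_dedup _ x).mpr List.mem_cons_self
          have : ((List.count x (x :: tl) : Int)) ∈ pvCounts (x :: tl) :=
            List.mem_map.mpr ⟨x, hx, rfl⟩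
          rw [hcs] at this
          simp at this
  | cons v vs =>
      have hvpos : 0 < v := pvCounts_pos playlist v (hcs ▸ List.mem_cons_self)
      simp only [PySem.List.max?_id_cons, foldl_count_if]
      unfold pvF
      have hfold : (v :: vs).foldl max 0 = vs.foldl max v := by
        simp only [List.foldl_cons, max_eq_right hvpos.le]
      have hgt : (v :: vs).foldl max 0 > 0 := by
        rw [hfold]
        exact lt_of_lt_of_le hvpos (foldl_max_ge v vs)
      rw [if_pos hgt, hfold]
      omega
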